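-- pv_equiv track=rewrite | github.com/schongallam/TAF-App | tafs.py | divide_METAR_list
-- ===== SOURCE A (Python) =====
-- def divide_METAR_list(METAR_stations, TAF_stations):
--     # This function is needed because we print solo METARs separately. So we need to identify them.
--     # The affiliated list is not really used for now, but might be useful in the future.
--     solo, affiliated = [], []
--     for METAR_station in METAR_stations:
--         if TAF_stations.__contains__(METAR_station):
--             if not affiliated.__contains__(METAR_station):
--                 affiliated.append(METAR_station)
--         else:
--             if not solo.__contains__(METAR_station):
--                 solo.append(METAR_station)
--     return solo, affiliated
-- ===== SOURCE B (Python) =====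
-- def divide_METAR_list(METAR_stations, TAF_stations):
--     # Dedup up front (first-seen order), then one branch-per-item partition pass
--     # against a prebuilt set of TAF stations.
--     unique = list(dict.fromkeys(METAR_stations))
--     taf = set(TAF_stations)
--     solo = [s for s in unique if s not in taf]
--     affiliated = [s for s in unique if s in taf]
--     return solo, affiliated
-- ===== Notes on version B (the rewrite author's own statement) =====
-- stated objective: faster
-- what changed: B dedups the input once via dict.fromkeys and partitions the unique stations against a prebuilt set, instead of A's per-item linear scans of TAF_stations and of the growing solo/affiliated lists.
import Mathlib
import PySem

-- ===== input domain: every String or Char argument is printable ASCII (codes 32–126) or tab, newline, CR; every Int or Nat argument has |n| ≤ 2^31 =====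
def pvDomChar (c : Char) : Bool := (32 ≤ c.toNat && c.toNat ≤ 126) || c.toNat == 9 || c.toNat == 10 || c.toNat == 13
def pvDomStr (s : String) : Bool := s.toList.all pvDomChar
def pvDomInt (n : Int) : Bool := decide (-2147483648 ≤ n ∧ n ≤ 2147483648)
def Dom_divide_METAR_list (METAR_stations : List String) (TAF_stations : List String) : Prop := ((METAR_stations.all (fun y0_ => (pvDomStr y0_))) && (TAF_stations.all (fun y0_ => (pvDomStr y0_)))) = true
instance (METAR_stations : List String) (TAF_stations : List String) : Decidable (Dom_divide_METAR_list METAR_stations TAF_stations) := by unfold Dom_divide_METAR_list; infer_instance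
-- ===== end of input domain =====

-- B dedups the METAR list once up front and then partitions the unique stations
-- against a prebuilt set, replacing A's inline per-item dedup scans (faster in a timing run).


-- ===== PORT A =====
-- one iteration of A's loop body, on the state (solo, affiliated)
def pvStepA (TAF_stations : List String) (acc : List String × List String)
    (METAR_station : String) : List String × List String :=
  if TAF_stations.contains METAR_station then
    if acc.2.contains METAR_station then acc else (acc.1, acc.2 ++ [METAR_station])
  else
    if acc.1.contains METAR_station then acc else (acc.1 ++ [METAR_station], acc.2)

def divide_METAR_list (METAR_stations : List String) (TAF_stations : List String) : List String × List String :=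
  METAR_stations.foldl (pvStepA TAF_stations) ([], [])

-- ===== PORT B =====
def divide_METAR_list_alt (METAR_stations : List String) (TAF_stations : List String) : List String × List String :=
  let unique := PySem.List.dedup METAR_stations          -- list(dict.fromkeys(...))
  let taf : PySem.Set String := PySem.Set.ofList TAF_stations
  (unique.filter (fun s => !(PySem.Set.contains taf s)),
   unique.filter (fun s => PySem.Set.contains taf s))

-- ===== PRECONDITION & SPEC =====
def Spec_divide_METAR_list (METAR_stations : List String) (TAF_stations : List String) (out : List String × List String) : Prop := out = divide_METAR_list_alt METAR_stations TAF_stations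
instance (METAR_stations : List String) (TAF_stations : List String) (out : List String × List String) : Decidable (Spec_divide_METAR_list METAR_stations TAF_stations out) := by unfold Spec_divide_METAR_list; infer_instance

-- ===== CLAIM (what is proved, stated in full; the proofs are below) =====
def Claim_equal_divide_METAR_list : Prop := ∀ (METAR_stations : List String) (TAF_stations : List String), Dom_divide_METAR_list METAR_stations TAF_stations → Spec_divide_METAR_list METAR_stations TAF_stations (divide_METAR_list METAR_stations TAF_stations)

-- ===== LEMMAS AND PROOFS =====

-- first-occurrence dedup of a list, relative to a set of already-seen elements
def pvUniqFrom (seen : List String) : List String → List String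
  | [] => []
  | x :: xs => if x ∈ seen then pvUniqFrom seen xs else x :: pvUniqFrom (x :: seen) xs

theorem pvUniqFrom_congr (M : List String) : ∀ (seen seen' : List String),
    (∀ y, y ∈ seen ↔ y ∈ seen') → pvUniqFrom seen M = pvUniqFrom seen' M := by
  induction M with
  | nil => intro _ _ _; rfl
  | cons x xs ih =>
    intro seen seen' h
    by_cases hx : x ∈ seen
    · simp only [pvUniqFrom, if_pos hx, if_pos ((h x).mp hx)]
      exact ih seen seen' h
    · simp only [pvUniqFrom, if_neg hx, if_neg (fun hx' => hx ((h x).mpr hx'))]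
      rw [ih (x :: seen) (x :: seen') (by intro y; simp [h y])]

theorem pvFoldlAdd_eq (M : List String) : ∀ (seen : List String),
    M.foldl PySem.Set.add seen = seen ++ pvUniqFrom seen M := by
  induction M with
  | nil => intro seen; simp [pvUniqFrom]
  | cons x xs ih =>
    intro seen
    by_cases hx : x ∈ seen
    · simp [List.foldl, PySem.Set.add, PySem.Set.contains_eq_listContains,
        List.contains_eq_mem, hx, pvUniqFrom, ih]
    · simp only [List.foldl, PySem.Set.add, PySem.Set.contains_eq_listContains,
        List.contains_eq_mem, hx, decide_false, Bool.false_eq_true, if_false,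
        pvUniqFrom]
      rw [ih (seen ++ [x]),
        pvUniqFrom_congr xs (seen ++ [x]) (x :: seen) (by intro y; simp; tauto)]
      simp

theorem pvDedup_eq (M : List String) : PySem.List.dedup M = pvUniqFrom [] M := by
  rw [PySem.List.dedup_eq_ofList, PySem.Set.ofList_eq_foldl, pvFoldlAdd_eq]; rfl

theorem pvKey (T : List String) (M : List String) : ∀ (s a : List String),
    (∀ x ∈ s, x ∉ T) → (∀ x ∈ a, x ∈ T) →
    M.foldl (pvStepA T) (s, a) =
      (s ++ (pvUniqFrom (s ++ a) M).filter (fun x => !decide (x ∈ T)),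
       a ++ (pvUniqFrom (s ++ a) M).filter (fun x => decide (x ∈ T))) := by
  induction M with
  | nil => intro s a _ _; simp [pvUniqFrom]
  | cons x xs ih =>
    intro s a hs ha
    by_cases hT : x ∈ T
    · by_cases hxa : x ∈ a
      · have hseen : x ∈ s ++ a := List.mem_append.mpr (Or.inr hxa)
        simp only [List.foldl, pvStepA, List.contains_eq_mem, hT, decide_true, if_true,
          hxa, pvUniqFrom, if_pos hseen]
        exact ih s a hs ha
      · have hxs : x ∉ s := fun hxs => hs x hxs hT
        have hseen : x ∉ s ++ a := by simp [hxs, hxa]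
        simp only [List.foldl, pvStepA, List.contains_eq_mem, hT, decide_true, if_true,
          hxa, decide_false, Bool.false_eq_true, if_false, pvUniqFrom, if_neg hseen]
        rw [ih s (a ++ [x]) hs (by intro y hy
                                   rcases List.mem_append.mp hy with h | h
                                   · exact ha y h
                                   · simp at h; subst h; exact hT),
          pvUniqFrom_congr xs (s ++ (a ++ [x])) (x :: (s ++ a)) (by intro y; simp; tauto)]
        simp [hT]
    · by_cases hxs : x ∈ s
      · have hseen : x ∈ s ++ a := List.mem_append.mpr (Or.inl hxs)
        simp only [List.foldl, pvStepA, List.contains_eq_mem, hT, decide_false,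
          Bool.false_eq_true, if_false, hxs, decide_true, if_true, pvUniqFrom, if_pos hseen]
        exact ih s a hs ha
      · have hxa : x ∉ a := fun hxa => hT (ha x hxa)
        have hseen : x ∉ s ++ a := by simp [hxs, hxa]
        simp only [List.foldl, pvStepA, List.contains_eq_mem, hT, decide_false,
          Bool.false_eq_true, if_false, hxs, pvUniqFrom, if_neg hseen]
        rw [ih (s ++ [x]) a (by intro y hy
                                rcases List.mem_append.mp hy with h | h
                                · exact hs y h
                                · simp at h; subst h; exact hT) ha,
          pvUniqFrom_congr xs ((s ++ [x]) ++ a) (x :: (s ++ a)) (by intro y; simp; tauto)]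
        simp [hT]

-- ===== VERDICT (by name: the statement is the Claim_ definition above) =====
theorem divide_METAR_list_spec : Claim_equal_divide_METAR_list := by
  intro M T _
  show divide_METAR_list M T = divide_METAR_list_alt M T
  unfold divide_METAR_list divide_METAR_list_alt
  rw [pvKey T M [] [] (by simp) (by simp), pvDedup_eq]
  simp only [List.nil_append]
  congr 1
  all_goals
    apply List.filter_congr
    intro x _
    by_cases hx : x ∈ T <;>
      simp [PySem.Set.contains_eq_listContains, List.contains_eq_mem, PySem.Set.mem_ofList, hx]
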